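-- pv_equiv track=rewrite | github.com/IBM/translucent-answer-prediction | tap2/bottom_machine/dataloader.py | truncate_passages
-- ===== SOURCE A (Python) =====
-- def truncate_passages(passages, qlen, max_seq_len):
--     passages.sort(key=lambda p: sum([len(s[1]) for s in p]))
--     sub_passages = []
--     for passage in passages:
--         splen = 0
--         sub_passage = passage
--         for si in range(len(passage)):
--             sent = passage[si]
--             # if this sentence will make the passage too long, stop adding and make a sub-passage
--             if splen + len(sent[1]) + qlen >= max_seq_len:
--                 sub_passage = passage[0:si]
--                 break
--             splen += len(sent[1])
--         sub_passages.append(sub_passage)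
--     return sub_passages
-- ===== SOURCE B (Python) =====
-- from itertools import accumulate
-- from bisect import bisect_left
--
--
-- def truncate_passages(passages, qlen, max_seq_len):
--     # NOTE: like the original, this sorts `passages` in place.
--     passages.sort(key=lambda p: sum([len(s[1]) for s in p]))
--     budget = max_seq_len - qlen
--     sub_passages = []
--     for passage in passages:
--         cum = list(accumulate(len(s[1]) for s in passage))
--         cutoff = bisect_left(cum, budget)
--         sub_passages.append(passage if cutoff == len(passage) else passage[:cutoff])
--     return sub_passages
-- ===== Notes on version B (the rewrite author's own statement) =====
-- stated objective: alternative
-- what changed: Replaces the early-break index scan per passage with a prefix-sum array (itertools.accumulate) plus bisect_left on the monotone cumulative lengths to find the cut point.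
import Mathlib
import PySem

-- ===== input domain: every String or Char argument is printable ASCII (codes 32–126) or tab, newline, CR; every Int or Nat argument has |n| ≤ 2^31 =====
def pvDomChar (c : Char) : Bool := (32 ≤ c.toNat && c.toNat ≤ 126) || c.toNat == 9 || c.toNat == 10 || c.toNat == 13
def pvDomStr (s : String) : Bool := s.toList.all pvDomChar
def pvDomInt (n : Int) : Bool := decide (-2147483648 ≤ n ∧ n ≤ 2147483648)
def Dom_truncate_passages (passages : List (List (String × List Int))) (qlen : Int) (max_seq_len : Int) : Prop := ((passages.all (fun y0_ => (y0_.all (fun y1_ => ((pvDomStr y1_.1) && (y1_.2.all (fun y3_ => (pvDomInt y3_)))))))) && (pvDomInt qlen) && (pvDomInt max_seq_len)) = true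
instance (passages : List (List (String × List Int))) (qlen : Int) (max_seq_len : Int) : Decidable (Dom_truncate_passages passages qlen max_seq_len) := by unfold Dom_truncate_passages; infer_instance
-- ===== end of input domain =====

-- B replaces A's early-break cumulative scan with prefix sums + bisect_left on the monotone
-- cumulative lengths (alternative decomposition, same cost). Both A and B sort `passages` in
-- place in Python; the equivalence proved here is about the return value.


-- ===== PORT A =====
-- key=lambda p: sum([len(s[1]) for s in p])
def pvKeyA (p : List (String × List Int)) : Int :=
  (p.map (fun s => (s.2.length : Int))).sum

-- the inner `for si in range(len(passage)): … break` loop; `rest = passage[si:]`, `splen` as in A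
def pvAGo (full : List (String × List Int)) (qlen max_seq_len : Int) :
    List (String × List Int) → Nat → Int → List (String × List Int)
  | [], _, _ => full
  | sent :: rest, si, splen =>
      if splen + (sent.2.length : Int) + qlen ≥ max_seq_len then
        PySem.List.slice full (some 0) (some (si : Int))
      else
        pvAGo full qlen max_seq_len rest (si + 1) (splen + (sent.2.length : Int))

def truncate_passages (passages : List (List (String × List Int))) (qlen : Int) (max_seq_len : Int) : List (List (String × List Int)) :=
  let sorted := PySem.List.sorted passages pvKeyA
  sorted.foldl (fun sub_passages passage =>
    sub_passages ++ [pvAGo passage qlen max_seq_len passage 0 0]) []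

-- ===== PORT B =====
-- list(accumulate(len(s[1]) for s in passage)), running total `acc`
def pvAccum : List (String × List Int) → Int → List Int
  | [], _ => []
  | s :: rest, acc => (acc + (s.2.length : Int)) :: pvAccum rest (acc + (s.2.length : Int))

def pvBodyB (qlen max_seq_len : Int) (passage : List (String × List Int)) : List (String × List Int) :=
  let budget := max_seq_len - qlen
  let cum := pvAccum passage 0
  let cutoff := PySem.List.bisectLeft cum budget
  if cutoff = passage.length then passage else passage.take cutoff

def truncate_passages_alt (passages : List (List (String × List Int))) (qlen : Int) (max_seq_len : Int) : List (List (String × List Int)) :=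
  (PySem.List.sorted passages pvKeyA).map (pvBodyB qlen max_seq_len)

-- ===== PRECONDITION & SPEC =====
def Spec_truncate_passages (passages : List (List (String × List Int))) (qlen : Int) (max_seq_len : Int) (out : List (List (String × List Int))) : Prop := out = truncate_passages_alt passages qlen max_seq_len
instance (passages : List (List (String × List Int))) (qlen : Int) (max_seq_len : Int) (out : List (List (String × List Int))) : Decidable (Spec_truncate_passages passages qlen max_seq_len out) := by unfold Spec_truncate_passages; infer_instance

-- ===== CLAIM (what is proved, stated in full; the proofs are below) =====
def Claim_equal_truncate_passages : Prop := ∀ (passages : List (List (String × List Int))) (qlen : Int) (max_seq_len : Int), Dom_truncate_passages passages qlen max_seq_len → Spec_truncate_passages passages qlen max_seq_len (truncate_passages passages qlen max_seq_len)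

-- ===== LEMMAS AND PROOFS =====

-- every entry of pvAccum rest acc is ≥ acc (lengths are non-negative)
lemma pvAccum_lower (rest : List (String × List Int)) (acc : Int) :
    ∀ x ∈ pvAccum rest acc, acc ≤ x := by
  induction rest generalizing acc with
  | nil => simp [pvAccum]
  | cons s rest ih =>
    intro x hx
    simp only [pvAccum, List.mem_cons] at hx
    have h0 : (0:Int) ≤ s.2.length := Int.natCast_nonneg _
    rcases hx with rfl | hx
    · omega
    · have := ih (acc + (s.2.length : Int)) x hx
      omega

-- the cumulative sums are non-decreasing
lemma pvAccum_pairwise (rest : List (String × List Int)) (acc : Int) :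
    (pvAccum rest acc).Pairwise (· ≤ ·) := by
  induction rest generalizing acc with
  | nil => simp [pvAccum]
  | cons s rest ih =>
    simp only [pvAccum, List.pairwise_cons]
    exact ⟨pvAccum_lower rest _, ih _⟩

-- the first element after the takeWhile prefix fails the predicate
lemma takeWhile_stop {α : Type} (p : α → Bool) (xs : List α)
    (h : (xs.takeWhile p).length < xs.length) :
    ¬ p (xs[(xs.takeWhile p).length]'h) = true := by
  induction xs with
  | nil => simp at h
  | cons a l ih =>
    by_cases hp : p a = true
    · have hlen : ((a :: l).takeWhile p).length = (l.takeWhile p).length + 1 := by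
        simp [hp]
      have h' : (l.takeWhile p).length < l.length := by
        simp only [List.length_cons] at h; omega
      have := ih h'
      simp only [List.takeWhile_cons, hp, if_true, List.length_cons] at h ⊢
      simpa using this
    · simp [hp]

-- on a non-decreasing list, bisect_left coincides with counting the entries < x
lemma bisectLeft_eq_takeWhile_length (xs : List Int) (x : Int)
    (h : xs.Pairwise (· ≤ ·)) :
    PySem.List.bisectLeft xs x = (xs.takeWhile (fun c => decide (c < x))).length := by
  obtain ⟨hle, hlt, hge⟩ := PySem.List.bisectLeft_spec xs x h
  set n := PySem.List.bisectLeft xs x with hn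
  set m := (xs.takeWhile (fun c => decide (c < x))).length with hm
  have hmle : m ≤ xs.length := by
    simpa [hm] using (List.takeWhile_prefix (p := fun c => decide (c < x)) (l := xs)).length_le
  have hpref : xs.takeWhile (fun c => decide (c < x)) <+: xs := List.takeWhile_prefix _
  have hmlt : ∀ j (hj : j < xs.length), j < m → xs[j] < x := by
    intro j hj hjm
    have hjm' : j < (xs.takeWhile (fun c => decide (c < x))).length := by omega
    have hget := hpref.getElem hjm'
    have hp := List.getElem_mem hjm'
    have := List.mem_takeWhile_imp hp
    simpa [hget] using of_decide_eq_true this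
  have hmge : ∀ hmlen : m < xs.length, x ≤ xs[m] := by
    intro hmlen
    have := takeWhile_stop (fun c => decide (c < x)) xs (by omega)
    simp only [decide_eq_true_eq, ← hm] at this
    omega
  rcases lt_trichotomy n m with hlt' | heq | hgt'
  · have h1 := hge n (by omega) (le_refl n)
    have h2 := hmlt n (by omega) hlt'
    omega
  · exact heq
  · have h1 := hlt m (by omega) hgt'
    have h2 := hmge (by omega)
    omega

-- A's inner loop computed in closed form via the cumulative sums
lemma pvAGo_eq (qlen max_seq_len : Int) (rest : List (String × List Int))
    (full : List (String × List Int)) (si : Nat) (acc : Int) :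
    pvAGo full qlen max_seq_len rest si acc =
      (let m := ((pvAccum rest acc).takeWhile (fun c => decide (c < max_seq_len - qlen))).length
       if m = rest.length then full else full.take (si + m)) := by
  induction rest generalizing si acc with
  | nil => simp [pvAGo, pvAccum]
  | cons sent rest ih =>
    simp only [pvAGo, pvAccum]
    by_cases hb : acc + (sent.2.length : Int) + qlen ≥ max_seq_len
    · have hnot : ¬ (acc + (sent.2.length : Int) < max_seq_len - qlen) := by omega
      simp only [if_pos hb, List.takeWhile_cons, decide_eq_true_eq, hnot, if_false]
      simp [PySem.List.slice_zero_start, PySem.List.slice_to_natCast]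
    · have hyes : acc + (sent.2.length : Int) < max_seq_len - qlen := by omega
      simp only [if_neg hb, List.takeWhile_cons, decide_eq_true_eq, hyes, if_true,
        List.length_cons]
      rw [ih]
      simp only []
      set m := ((pvAccum rest (acc + (sent.2.length : Int))).takeWhile
        (fun c => decide (c < max_seq_len - qlen))).length
      by_cases hm : m = rest.length
      · simp [hm]
      · have : ¬ (m + 1 = rest.length + 1) := by omega
        simp [hm]
        congr 1
        omega

-- foldl-append builds the map
lemma foldl_append_singleton {α β : Type} (f : α → β) (l : List α) (acc : List β) :
    l.foldl (fun a x => a ++ [f x]) acc = acc ++ l.map f := by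
  induction l generalizing acc with
  | nil => simp
  | cons x l ih => simp [List.foldl_cons, ih]

-- one passage: A's loop result equals B's bisect-based body
lemma body_eq (qlen max_seq_len : Int) (p : List (String × List Int)) :
    pvAGo p qlen max_seq_len p 0 0 = pvBodyB qlen max_seq_len p := by
  rw [pvAGo_eq]
  simp only [pvBodyB]
  rw [bisectLeft_eq_takeWhile_length _ _ (pvAccum_pairwise p 0)]
  set m := ((pvAccum p 0).takeWhile (fun c => decide (c < max_seq_len - qlen))).length
  by_cases hm : m = p.length <;> simp [hm]

-- ===== VERDICT (by name: the statement is the Claim_ definition above) =====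
theorem truncate_passages_spec : Claim_equal_truncate_passages := by
  intro passages qlen max_seq_len _
  unfold Spec_truncate_passages truncate_passages truncate_passages_alt
  show (PySem.List.sorted passages pvKeyA).foldl
      (fun sub_passages passage => sub_passages ++ [pvAGo passage qlen max_seq_len passage 0 0]) []
      = (PySem.List.sorted passages pvKeyA).map (pvBodyB qlen max_seq_len)
  rw [foldl_append_singleton (fun passage => pvAGo passage qlen max_seq_len passage 0 0)]
  rw [List.nil_append]
  exact List.map_congr_left (fun p _ => body_eq qlen max_seq_len p)
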